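-- pv_equiv track=rewrite | github.com/mcoavoux/wiki_parse | parse_wiki.py | generate_files_bunch
-- ===== SOURCE A (Python) =====
-- def generate_files_bunch(files_list_list):
--     tmp = []
--     i = 0
--     for flist in files_list_list:
--         for f in flist:
--             tmp.append(f)
--             i += 1
--             if i % 200 == 0 :
--                 yield tmp
--                 tmp = []
--     if len(tmp) > 0:
--         yield tmp
-- ===== SOURCE B (Python) =====
-- from itertools import chain, islice
--
-- def generate_files_bunch(files_list_list):
--     it = chain.from_iterable(files_list_list)
--     while True:
--         chunk = list(islice(it, 200))
--         if not chunk: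
--             break
--         yield chunk
-- ===== Notes on version B (the rewrite author's own statement) =====
-- stated objective: idiomatic
-- what changed: Replaced the explicit nested loop with an element counter and i % 200 test by lazily flattening with itertools.chain.from_iterable and repeatedly taking the next 200 elements with itertools.islice.
import Mathlib
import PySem

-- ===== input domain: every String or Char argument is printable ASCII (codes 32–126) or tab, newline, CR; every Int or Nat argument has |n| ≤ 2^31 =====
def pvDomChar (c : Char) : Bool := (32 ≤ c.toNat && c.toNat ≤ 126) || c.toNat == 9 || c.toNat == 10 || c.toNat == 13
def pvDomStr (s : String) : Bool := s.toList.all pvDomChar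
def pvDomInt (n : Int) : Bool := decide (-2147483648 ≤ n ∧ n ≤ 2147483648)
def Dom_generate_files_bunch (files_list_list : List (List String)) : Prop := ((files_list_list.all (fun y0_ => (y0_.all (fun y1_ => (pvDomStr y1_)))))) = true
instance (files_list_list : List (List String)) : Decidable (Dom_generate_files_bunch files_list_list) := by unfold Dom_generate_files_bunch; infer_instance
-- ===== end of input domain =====

-- B flattens lazily and takes 200 at a time (chain.from_iterable + islice) instead of A's nested loop with an i % 200 counter; same output, idiomatic decomposition.

-- ===== PORT A =====
-- state: (yielded chunks so far, tmp buffer, element counter i)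
def pvStepA (st : List (List String) × List String × Nat) (f : String) :
    List (List String) × List String × Nat :=
  let tmp := st.2.1 ++ [f]
  let i := st.2.2 + 1
  if i % 200 == 0 then (st.1 ++ [tmp], [], i) else (st.1, tmp, i)

def generate_files_bunch (files_list_list : List (List String)) : List (List String) :=
  let st := files_list_list.foldl (fun st flist => flist.foldl pvStepA st) ([], [], 0)
  if st.2.1.length > 0 then st.1 ++ [st.2.1] else st.1

-- ===== PORT B =====
-- list(islice(it, 200)) on the flattened stream, repeated until empty
def pvChunks200 (l : List String) : List (List String) :=
  if h : l = [] then [] else l.take 200 :: pvChunks200 (l.drop 200)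
termination_by l.length
decreasing_by
  have : 0 < l.length := List.length_pos_iff.mpr h
  simp [List.length_drop]; omega

def generate_files_bunch_alt (files_list_list : List (List String)) : List (List String) :=
  pvChunks200 files_list_list.flatten

-- ===== PRECONDITION & SPEC =====
def Spec_generate_files_bunch (files_list_list : List (List String)) (out : List (List String)) : Prop := out = generate_files_bunch_alt files_list_list
instance (files_list_list : List (List String)) (out : List (List String)) : Decidable (Spec_generate_files_bunch files_list_list out) := by unfold Spec_generate_files_bunch; infer_instance

-- ===== CLAIM (what is proved, stated in full; the proofs are below) =====
def Claim_equal_generate_files_bunch : Prop := ∀ (files_list_list : List (List String)), Dom_generate_files_bunch files_list_list → Spec_generate_files_bunch files_list_list (generate_files_bunch files_list_list)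

-- ===== LEMMAS AND PROOFS =====

lemma pvChunks200_nil : pvChunks200 [] = [] := by
  rw [pvChunks200]; simp

lemma pvChunks200_short (l : List String) (h : l.length < 200) (hne : l ≠ []) :
    pvChunks200 l = [l] := by
  rw [pvChunks200]
  simp [hne, List.take_of_length_le (le_of_lt h), List.drop_of_length_le (le_of_lt h),
    pvChunks200_nil]

lemma pvChunks200_full (tmp l : List String) (h : tmp.length = 200) :
    pvChunks200 (tmp ++ l) = tmp :: pvChunks200 l := by
  have hne : tmp ++ l ≠ [] := by
    intro hc; apply_fun List.length at hc; simp [h] at hc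
  rw [pvChunks200]
  have ht : (tmp ++ l).take 200 = tmp := by
    rw [List.take_append_of_le_length (by omega), List.take_of_length_le (by omega)]
  have hd : (tmp ++ l).drop 200 = l := by
    rw [List.drop_append_of_le_length (by omega), List.drop_of_length_le (by omega)]
    simp
  simp [hne, ht, hd]

-- main invariant: folding pvStepA over l from (out, tmp, i) with i % 200 = tmp.length < 200
lemma pvFold_inv (l : List String) :
    ∀ (out : List (List String)) (tmp : List String) (i : Nat),
    i % 200 = tmp.length → tmp.length < 200 →
    (let st := l.foldl pvStepA (out, tmp, i)
     (if st.2.1.length > 0 then st.1 ++ [st.2.1] else st.1)) =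
      out ++ pvChunks200 (tmp ++ l) := by
  induction l with
  | nil =>
    intro out tmp i hi hlt
    simp only [List.foldl_nil, List.append_nil]
    by_cases hne : tmp = []
    · simp [hne, pvChunks200_nil]
    · have : tmp.length > 0 := List.length_pos_iff.mpr hne
      simp [this, pvChunks200_short tmp hlt hne]
  | cons f l ih =>
    intro out tmp i hi hlt
    simp only [List.foldl_cons]
    by_cases hfull : (i + 1) % 200 = 0
    · have h200 : tmp.length + 1 = 200 := by omega
      have : pvStepA (out, tmp, i) f = (out ++ [tmp ++ [f]], [], i + 1) := by
        simp [pvStepA, hfull]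
      rw [this, ih (out ++ [tmp ++ [f]]) [] (i + 1) (by simp [hfull]) (by simp)]
      have : tmp ++ f :: l = (tmp ++ [f]) ++ l := by simp
      rw [this, pvChunks200_full (tmp ++ [f]) l (by simp; omega)]
      simp
    · have : pvStepA (out, tmp, i) f = (out, tmp ++ [f], i + 1) := by
        simp [pvStepA, hfull]
      rw [this, ih out (tmp ++ [f]) (i + 1) (by simp; omega) (by simp; omega)]
      simp

lemma pvFold_flatten (xs : List (List String)) (st : List (List String) × List String × Nat) :
    xs.foldl (fun st flist => flist.foldl pvStepA st) st = xs.flatten.foldl pvStepA st := by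
  induction xs generalizing st with
  | nil => simp
  | cons a xs ih => simp [List.foldl_append, ih]

-- ===== VERDICT (by name: the statement is the Claim_ definition above) =====
theorem generate_files_bunch_spec : Claim_equal_generate_files_bunch := by
  intro xs _
  unfold Spec_generate_files_bunch generate_files_bunch generate_files_bunch_alt
  rw [pvFold_flatten]
  simpa using pvFold_inv xs.flatten [] [] 0 rfl (by norm_num)
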